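-- pv_equiv track=rewrite | github.com/pyrypiironen/Delivery_fee_calculator | main.py | items_surcharge
-- ===== SOURCE A (Python) =====
-- def	items_surcharge(number_of_items):
-- 	fee = 0
-- 	if number_of_items > 12:
-- 		fee += 120
-- 	number_of_items -= 4
-- 	while number_of_items > 0:
-- 		fee += 50
-- 		number_of_items -= 1
-- 	return fee
-- ===== SOURCE B (Python) =====
-- def items_surcharge(number_of_items):
--     return max(0, number_of_items - 4) * 50 + (120 if number_of_items > 12 else 0)
-- ===== Notes on version B (the rewrite author's own statement) =====
-- stated objective: faster
-- what changed: Replaced the 50-per-item while loop with the closed form max(0,n-4)*50 plus the conditional 120 bulk fee.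
import Mathlib
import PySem

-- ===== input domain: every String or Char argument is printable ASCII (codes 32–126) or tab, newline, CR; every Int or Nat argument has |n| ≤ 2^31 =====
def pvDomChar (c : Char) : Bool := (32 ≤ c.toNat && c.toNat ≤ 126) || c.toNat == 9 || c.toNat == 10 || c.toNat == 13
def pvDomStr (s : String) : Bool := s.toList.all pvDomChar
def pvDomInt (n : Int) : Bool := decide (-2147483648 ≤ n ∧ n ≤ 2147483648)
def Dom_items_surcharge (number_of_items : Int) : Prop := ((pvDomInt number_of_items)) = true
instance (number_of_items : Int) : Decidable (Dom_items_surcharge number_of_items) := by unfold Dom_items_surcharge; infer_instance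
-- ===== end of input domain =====

-- B replaces A's 50-per-item while loop with the closed form max(0,n-4)*50 + conditional 120 (O(1) vs O(n)).


-- ===== PORT A =====
-- the 'while number_of_items > 0' loop: adds 50 per iteration, decrements; terminates since n.toNat decreases
def itemsLoop (n : Int) (fee : Int) : Int :=
  if h : n > 0 then itemsLoop (n - 1) (fee + 50) else fee
termination_by n.toNat
decreasing_by omega

def items_surcharge (number_of_items : Int) : Int :=
  let fee : Int := 0
  let fee := if number_of_items > 12 then fee + 120 else fee
  itemsLoop (number_of_items - 4) fee

-- ===== PORT B =====
def items_surcharge_alt (number_of_items : Int) : Int :=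
  max 0 (number_of_items - 4) * 50 + (if number_of_items > 12 then 120 else 0)

-- ===== PRECONDITION & SPEC =====
def Spec_items_surcharge (number_of_items : Int) (out : Int) : Prop := out = items_surcharge_alt number_of_items
instance (number_of_items : Int) (out : Int) : Decidable (Spec_items_surcharge number_of_items out) := by unfold Spec_items_surcharge; infer_instance

-- ===== CLAIM (what is proved, stated in full; the proofs are below) =====
def Claim_equal_items_surcharge : Prop := ∀ (number_of_items : Int), Dom_items_surcharge number_of_items → Spec_items_surcharge number_of_items (items_surcharge number_of_items)

-- ===== LEMMAS AND PROOFS =====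
theorem itemsLoop_eq (n : Int) (fee : Int) : itemsLoop n fee = fee + max 0 n * 50 := by
  induction n, fee using itemsLoop.induct with
  | case1 n fee h ih => rw [itemsLoop]; simp only [h, dite_true]; rw [ih]; omega
  | case2 n fee h => rw [itemsLoop]; simp only [h, dite_false]; omega

-- ===== VERDICT (by name: the statement is the Claim_ definition above) =====
theorem items_surcharge_spec : Claim_equal_items_surcharge := by
  intro n _
  unfold Spec_items_surcharge items_surcharge items_surcharge_alt
  simp only []
  rw [itemsLoop_eq]
  split <;> omega
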